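-- pv_equiv track=rewrite | github.com/BessonovDA/Algorithms | nearest_null.py | distances_to_symbol
-- ===== SOURCE A (Python) =====
-- def distances_to_symbol(symbols, target='0'):
--     distances = [0] * len(symbols)
--     zeros = [symbol_pos for symbol_pos, symbol
--              in enumerate(symbols) if symbol == target]
--     first, last = zeros[0], zeros[-1]
--     distances[:first] = [first - pos for pos in range(first)]
--     distances[last + 1:] = [
--         pos - last for pos in range(last + 1, len(symbols))]
--     for prev, next in zip(zeros, zeros[1:]):
--         distances[prev + 1:next] = [
--             min(pos - prev, next - pos) for pos in range(prev + 1, next)]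
--     return distances
-- ===== SOURCE B (Python) =====
-- def distances_to_symbol(symbols, target='0'):
--     # Two-pass sweep: distance to the most recent target on the left (to the
--     # first target, for the prefix before any), then right-to-left min with the
--     # next target on the right. No target-position list, no gap filling.
--     first = symbols.index(target)
--     dist = []
--     last = None
--     for i, s in enumerate(symbols):
--         if s == target:
--             last = i
--         dist.append(first - i if last is None else i - last)
--     res = []
--     nxt = None
--     for (i, s), d in zip(reversed(list(enumerate(symbols))), reversed(dist)):
--         if s == target:
--             nxt = i
--         res.append(d if nxt is None else min(d, nxt - i))
--     res.reverse()
--     return res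
-- ===== Notes on version B (the rewrite author's own statement) =====
-- stated objective: alternative
-- what changed: Replaces A's collect-all-target-positions plus three slice-assignment gap-fills with a two-pass sweep (left-to-right distance to last target, then right-to-left min with next target) that never materialises the position list.
import Mathlib
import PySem

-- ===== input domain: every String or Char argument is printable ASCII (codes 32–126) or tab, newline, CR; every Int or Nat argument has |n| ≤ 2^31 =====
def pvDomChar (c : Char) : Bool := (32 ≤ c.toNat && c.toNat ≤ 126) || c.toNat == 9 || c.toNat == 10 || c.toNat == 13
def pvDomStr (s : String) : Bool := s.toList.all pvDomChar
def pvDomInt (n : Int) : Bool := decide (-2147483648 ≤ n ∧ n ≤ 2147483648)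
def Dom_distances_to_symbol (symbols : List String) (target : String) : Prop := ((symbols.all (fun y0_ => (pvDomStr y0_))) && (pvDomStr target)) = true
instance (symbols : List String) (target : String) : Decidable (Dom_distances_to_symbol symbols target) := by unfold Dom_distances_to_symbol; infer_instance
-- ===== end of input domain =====

-- B replaces A's target-position list + three slice-assignment gap-fills by a two-pass
-- sweep (left-to-right, then right-to-left); same O(n) cost, different decomposition.

-- ===== PORT A =====
-- loop body of A's slice-assignment loop: distances[prev+1:next] = [min(pos-prev, next-pos) ...]
-- (slice assignment whose RHS has exactly the slice's length = take ++ new ++ drop)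
def pvStepA (d : List Int) (pq : Int × Int) : List Int :=
  d.take (pq.1 + 1).toNat
    ++ (PySem.List.pyRange (pq.1 + 1) pq.2 1).map (fun pos => min (pos - pq.1) (pq.2 - pos))
    ++ d.drop pq.2.toNat

def distances_to_symbol (symbols : List String) (target : String) : List Int :=
  let n : Int := symbols.length
  let distances : List Int := List.replicate symbols.length 0
  let zeros : List Int := ((PySem.List.enumerate symbols 0).filter (fun p => p.2 == target)).map (fun p => p.1)
  match zeros.head?, zeros.getLast? with
  | some first, some last =>
    -- distances[:first] = [first - pos for pos in range(first)]
    let d1 := (PySem.List.pyRange 0 first 1).map (fun pos => first - pos) ++ distances.drop first.toNat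
    -- distances[last+1:] = [pos - last for pos in range(last+1, len(symbols))]
    let d2 := d1.take (last + 1).toNat ++ (PySem.List.pyRange (last + 1) n 1).map (fun pos => pos - last)
    (zeros.zip zeros.tail).foldl pvStepA d2
  | _, _ => distances   -- zeros[0] raises IndexError in Python; excluded by Pre_

-- ===== PORT B =====
-- body of B's forward loop (last-target index, growing dist array; before any
-- target the distance runs to `first`, the index of the first target)
def pvStepF (target : String) (first : Int) (st : Option Int × List Int) (p : Int × String) : Option Int × List Int :=
  let last := if p.2 == target then some p.1 else st.1
  (last, st.2 ++ [match last with | none => first - p.1 | some l => p.1 - l])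

-- body of B's backward loop (next-target index, building dist back-to-front)
def pvStepB (target : String) (p : (Int × String) × Int) (st : Option Int × List Int) : Option Int × List Int :=
  let nxt := if p.1.2 == target then some p.1.1 else st.1
  (nxt, (match nxt with | none => p.2 | some j => min p.2 (j - p.1.1)) :: st.2)

def distances_to_symbol_alt (symbols : List String) (target : String) : List Int :=
  match PySem.List.index? symbols target with
  | none => []   -- symbols.index(target) raises ValueError; excluded by Pre_
  | some first =>
    let dist := ((PySem.List.enumerate symbols 0).foldl (pvStepF target (first : Int)) ((none : Option Int), ([] : List Int))).2
    -- reversed iteration + append + final reverse = foldr building the list front-to-back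
    (((PySem.List.enumerate symbols 0).zip dist).foldr (pvStepB target) ((none : Option Int), ([] : List Int))).2

-- ===== PRECONDITION & SPEC =====
-- Pre_ excludes exactly the inputs where A raises IndexError at zeros[0] (target absent from
-- symbols); B's symbols.index(target) raises ValueError on the same inputs.
def Pre_distances_to_symbol (symbols : List String) (target : String) : Prop := target ∈ symbols
instance (symbols : List String) (target : String) : Decidable (Pre_distances_to_symbol symbols target) := by unfold Pre_distances_to_symbol; infer_instance
def pvWitness_distances_to_symbol : List String × String := (["1", "0", "1", "1", "0"], "0")

def Spec_distances_to_symbol (symbols : List String) (target : String) (out : List Int) : Prop := out = distances_to_symbol_alt symbols target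
instance (symbols : List String) (target : String) (out : List Int) : Decidable (Spec_distances_to_symbol symbols target out) := by unfold Spec_distances_to_symbol; infer_instance

-- ===== CLAIM (what is proved, stated in full; the proofs are below) =====
def Claim_equal_distances_to_symbol : Prop := ∀ (symbols : List String) (target : String), Dom_distances_to_symbol symbols target → Pre_distances_to_symbol symbols target → Spec_distances_to_symbol symbols target (distances_to_symbol symbols target)

-- ===== LEMMAS AND PROOFS =====

-- positions of target in xs, starting at index s (= A's `zeros` / the indices B's passes track)
def pvZeros (target : String) : List String → Int → List Int
  | [], _ => []
  | x :: xs, s => if x == target then s :: pvZeros target xs (s + 1) else pvZeros target xs (s + 1)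

-- the common shape of the answer strictly after a target at `prev`, up to end index e
def pvChunks (e : Int) : List Int → Int → List Int
  | [], prev => (PySem.List.pyRange (prev + 1) e 1).map (fun p => p - prev)
  | z :: zs, prev => (PySem.List.pyRange (prev + 1) z 1).map (fun p => min (p - prev) (z - p)) ++ 0 :: pvChunks e zs z

-- the common shape of the whole answer from index s, with o = last target before s
def pvBModel (N first : Int) : List Int → Int → Option Int → List Int
  | [], s, o => (PySem.List.pyRange s N 1).map (fun i => match o with | none => first - i | some l => i - l)
  | z :: zs, s, o => (PySem.List.pyRange s z 1).map (fun i => match o with | none => z - i | some l => min (i - l) (z - i)) ++ 0 :: pvChunks N zs z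

-- pure recursions mirroring B's two folds
def pvFwd (target : String) (first : Int) : List String → Int → Option Int → List Int
  | [], _, _ => []
  | x :: xs, i, o =>
    let o' := if x == target then some i else o
    (match o' with | none => first - i | some l => i - l) :: pvFwd target first xs (i + 1) o'

def pvLastO (target : String) : List String → Int → Option Int → Option Int
  | [], _, o => o
  | x :: xs, i, o => pvLastO target xs (i + 1) (if x == target then some i else o)

def pvBwd (target : String) (first : Int) : List String → Int → Option Int → Option Int × List Int
  | [], _, _ => (none, [])
  | x :: xs, s, o =>
    let o' := if x == target then some s else o
    let r := pvBwd target first xs (s + 1) o'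
    let nxt := if x == target then some s else r.1
    let v : Int := match o' with | none => first - s | some l => s - l
    (nxt, (match nxt with | none => v | some j => min v (j - s)) :: r.2)

theorem pv_zeros_eq (target : String) (xs : List String) (s : Int) :
    ((PySem.List.enumerate xs s).filter (fun p => p.2 == target)).map (fun p => p.1) = pvZeros target xs s := by
  induction xs generalizing s with
  | nil => simp [pvZeros, PySem.List.enumerate]
  | cons x xs ih =>
    rw [PySem.List.enumerate_cons]
    by_cases h : x == target <;> simp [pvZeros, h, ih]


theorem pv_zeros_mem (target : String) (xs : List String) (s z : Int)
    (h : z ∈ pvZeros target xs s) : s ≤ z ∧ z < s + xs.length := by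
  induction xs generalizing s with
  | nil => simp [pvZeros] at h
  | cons x xs ih =>
    simp only [pvZeros] at h
    split at h
    · rcases List.mem_cons.mp h with h' | h'
      · subst h'; simp only [List.length_cons]; push_cast; omega
      · have := ih (s + 1) h'; simp only [List.length_cons]; push_cast; omega
    · have := ih (s + 1) h; simp only [List.length_cons]; push_cast; omega


theorem pv_zeros_ne_nil (target : String) (xs : List String) (s : Int)
    (h : target ∈ xs) : pvZeros target xs s ≠ [] := by
  induction xs generalizing s with
  | nil => simp at h
  | cons x xs ih =>
    simp only [pvZeros]
    rcases List.mem_cons.mp h with h' | h'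
    · subst h'; simp
    · split
      · simp
      · exact ih (s + 1) h'


theorem pv_zeros_chain (target : String) (xs : List String) (s : Int) :
    (pvZeros target xs s).IsChain (· < ·) := by
  induction xs generalizing s with
  | nil => simp [pvZeros]
  | cons x xs ih =>
    simp only [pvZeros]
    split
    · refine (ih (s + 1)).cons ?_
      intro y hy
      cases hl : pvZeros target xs (s + 1) with
      | nil => rw [hl] at hy; simp at hy
      | cons a l =>
        rw [hl] at hy; simp at hy; subst hy
        have : a ∈ pvZeros target xs (s + 1) := by rw [hl]; simp
        have := pv_zeros_mem target xs (s + 1) a this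
        omega
    · exact ih (s + 1)


theorem pv_index?_eq (target : String) (xs : List String) (s : Int) :
    (pvZeros target xs s).head? = (PySem.List.index? xs target).map (fun k => s + (k : Int)) := by
  induction xs generalizing s with
  | nil => simp [pvZeros, PySem.List.index?_eq_idxOf?]
  | cons x xs ih =>
    by_cases hx : x == target
    · have hxe : x = target := by simpa using hx
      subst hxe
      rw [PySem.List.index?_cons_self]
      simp [pvZeros]
    · have hne : x ≠ target := by simpa using hx
      rw [PySem.List.index?_cons_of_ne _ hne]
      simp only [pvZeros, hx, Bool.false_eq_true, ite_false, ih]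
      cases PySem.List.index? xs target with
      | none => simp
      | some k => simp; omega

theorem pv_fwd_fold (target : String) (first : Int) (xs : List String) (s : Int) (o : Option Int) (acc : List Int) :
    (PySem.List.enumerate xs s).foldl (pvStepF target first) (o, acc)
      = (pvLastO target xs s o, acc ++ pvFwd target first xs s o) := by
  induction xs generalizing s o acc with
  | nil => simp [pvFwd, pvLastO, PySem.List.enumerate]
  | cons x xs ih =>
    rw [PySem.List.enumerate_cons]
    simp only [List.foldl_cons, pvStepF, pvFwd, pvLastO, ih, List.append_assoc, List.singleton_append]


theorem pv_bwd_fold (target : String) (first : Int) (xs : List String) (s : Int) (o : Option Int) :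
    ((PySem.List.enumerate xs s).zip (pvFwd target first xs s o)).foldr (pvStepB target) ((none : Option Int), ([] : List Int))
      = pvBwd target first xs s o := by
  induction xs generalizing s o with
  | nil => simp [pvFwd, pvBwd, PySem.List.enumerate]
  | cons x xs ih =>
    rw [PySem.List.enumerate_cons]
    simp only [pvFwd, pvBwd, List.zip_cons_cons, List.foldr_cons, ih, pvStepB]


theorem pv_bmodel_some_succ (N first s : Int) (zs : List Int) :
    pvBModel N first zs (s + 1) (some s) = pvChunks N zs s := by
  cases zs <;> simp [pvBModel, pvChunks]


theorem pv_bwd_spec (target : String) (N first : Int) (xs : List String) (s : Int) (o : Option Int)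
    (hs : 0 ≤ s) (hN : s + xs.length = N)
    (hfirst : o = none → ((pvZeros target xs s).head? = some first ∨ pvZeros target xs s = [])) :
    pvBwd target first xs s o = ((pvZeros target xs s).head?, pvBModel N first (pvZeros target xs s) s o) := by
  induction xs generalizing s o with
  | nil =>
    simp only [List.length_nil, Nat.cast_zero, add_zero] at hN
    simp [pvBwd, pvZeros, pvBModel, PySem.List.pyRange_one_eq_nil (le_of_eq hN.symm)]
  | cons x xs ih =>
    have hlen : s + 1 + (xs.length : Int) = N := by
      simp only [List.length_cons] at hN; push_cast at hN ⊢; omega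
    by_cases hx : x == target
    · have ihx := ih (s + 1) (some s) (by omega) hlen (fun h => nomatch h)
      simp only [pvBwd, pvZeros, hx, if_pos, ihx]
      rw [pv_bmodel_some_succ]
      simp [pvBModel, PySem.List.pyRange_one_eq_nil (le_refl s)]
    · have hzeq : pvZeros target (x :: xs) s = pvZeros target xs (s + 1) := by
        simp [pvZeros, hx]
      have ihx := ih (s + 1) o (by omega) hlen (fun h => by rw [← hzeq]; exact hfirst h)
      simp only [pvBwd, pvZeros, hx, Bool.false_eq_true, ite_false, ihx]
      cases hz : pvZeros target xs (s + 1) with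
      | nil =>
        have hsN : s < N := by omega
        simp only [List.head?_nil, pvBModel]
        conv_rhs => rw [PySem.List.pyRange_one_cons hsN]
        cases o <;> rfl
      | cons z rest =>
        have hzmem : z ∈ pvZeros target xs (s + 1) := by rw [hz]; simp
        have hzb := pv_zeros_mem target xs (s + 1) z hzmem
        simp only [List.head?_cons, pvBModel]
        conv_rhs => rw [PySem.List.pyRange_one_cons (show s < z by omega)]
        cases o with
        | none =>
          have hfz : first = z := by
            rcases hfirst rfl with h | h
            · rw [hzeq, hz, List.head?_cons] at h; exact (Option.some.inj h).symm
            · rw [hzeq, hz] at h; exact absurd h (List.cons_ne_nil _ _)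
          subst hfz
          simp
        | some l => rfl

theorem pv_le_getLastD (z : Int) (zs : List Int) (h : (z :: zs).IsChain (· < ·)) :
    z ≤ zs.getLastD z := by
  induction zs generalizing z with
  | nil => simp
  | cons a l ih =>
    have h1 : z < a := h.rel_head
    have h2 : (a :: l).IsChain (· < ·) := h.tail
    have := ih a h2
    rw [List.getLastD_cons]
    omega


theorem pv_fill (N : Int) (zs : List Int) (z : Int) (pre : List Int)
    (h1 : ∀ y ∈ z :: zs, 0 ≤ y ∧ y < N)
    (hc : (z :: zs).IsChain (· < ·))
    (hpre : pre.length = (z + 1).toNat) :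
    ((z :: zs).zip zs).foldl pvStepA
        (pre ++ List.replicate (zs.getLastD z - z).toNat 0
             ++ (PySem.List.pyRange (zs.getLastD z + 1) N 1).map (fun p => p - zs.getLastD z))
      = pre ++ pvChunks N zs z := by
  induction zs generalizing z pre with
  | nil => simp [pvChunks]
  | cons z1 zs' ih =>
    have hz1 : z < z1 := hc.rel_head
    have hc' : (z1 :: zs').IsChain (· < ·) := hc.tail
    have h1' : ∀ y ∈ z1 :: zs', 0 ≤ y ∧ y < N := fun y hy => h1 y (List.mem_cons_of_mem _ hy)
    have hzb : 0 ≤ z ∧ z < N := h1 z List.mem_cons_self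
    have hz1b : 0 ≤ z1 ∧ z1 < N := h1' z1 List.mem_cons_self
    have hL1 : z1 ≤ zs'.getLastD z1 := pv_le_getLastD z1 zs' hc'
    have hLb : 0 ≤ zs'.getLastD z1 ∧ zs'.getLastD z1 < N := h1' _ List.getLastD_mem_cons
    rw [List.getLastD_cons, List.zip_cons_cons, List.foldl_cons]
    have hsplit : List.replicate (zs'.getLastD z1 - z).toNat (0 : Int)
        = List.replicate (z1 - (z + 1)).toNat 0 ++ (0 :: List.replicate (zs'.getLastD z1 - z1).toNat 0) := by
      rw [← List.replicate_succ, ← List.replicate_add]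
      congr 1
      omega
    have hstep : pvStepA (pre ++ List.replicate (zs'.getLastD z1 - z).toNat 0
          ++ (PySem.List.pyRange (zs'.getLastD z1 + 1) N 1).map (fun p => p - zs'.getLastD z1)) (z, z1)
        = (pre ++ (PySem.List.pyRange (z + 1) z1 1).map (fun pos => min (pos - z) (z1 - pos)) ++ [0])
          ++ List.replicate (zs'.getLastD z1 - z1).toNat 0
          ++ (PySem.List.pyRange (zs'.getLastD z1 + 1) N 1).map (fun p => p - zs'.getLastD z1) := by
      unfold pvStepA
      rw [hsplit]
      simp only [List.append_assoc, List.cons_append]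
      rw [List.take_left' (by omega : pre.length = ((z, z1).1 + 1).toNat)]
      rw [← List.append_assoc pre (List.replicate (z1 - (z + 1)).toNat 0)]
      rw [List.drop_left' (by
        simp only [List.length_append, List.length_replicate, hpre]
        omega : (pre ++ List.replicate (z1 - (z + 1)).toNat (0 : Int)).length = ((z, z1).2).toNat)]
      simp
    rw [hstep]
    have hpre' : (pre ++ (PySem.List.pyRange (z + 1) z1 1).map (fun pos => min (pos - z) (z1 - pos)) ++ [0]).length
        = (z1 + 1).toNat := by
      simp only [List.length_append, List.length_map, PySem.List.length_pyRange_one, hpre,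
        List.length_cons, List.length_nil]
      omega
    rw [ih z1 _ h1' hc' hpre']
    simp [pvChunks]

-- ===== VERDICT (by name: the statement is the Claim_ definition above) =====
theorem pv_getLast?_cons (a : Int) (l : List Int) : (a :: l).getLast? = some (l.getLastD a) := by
  induction l generalizing a with
  | nil => rfl
  | cons b m ih => rw [List.getLast?_cons_cons, ih, List.getLastD_cons]

theorem distances_to_symbol_spec : Claim_equal_distances_to_symbol := by
  intro symbols target _ hpre
  unfold Spec_distances_to_symbol
  have hne := pv_zeros_ne_nil target symbols 0 hpre
  obtain ⟨z0, zs, hzeros⟩ := List.exists_cons_of_ne_nil hne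
  have hmem : ∀ y ∈ z0 :: zs, 0 ≤ y ∧ y < (symbols.length : Int) := by
    intro y hy
    have := pv_zeros_mem target symbols 0 y (by rw [hzeros]; exact hy)
    omega
  have hchain : (z0 :: zs).IsChain (· < ·) := by
    have := pv_zeros_chain target symbols 0
    rwa [hzeros] at this
  have hz0 : 0 ≤ z0 ∧ z0 < (symbols.length : Int) := hmem z0 List.mem_cons_self
  have hL1 : z0 ≤ zs.getLastD z0 := pv_le_getLastD z0 zs hchain
  have hLb : 0 ≤ zs.getLastD z0 ∧ zs.getLastD z0 < (symbols.length : Int) :=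
    hmem _ List.getLastD_mem_cons
  have hB : distances_to_symbol_alt symbols target
      = pvBModel (symbols.length) z0 (z0 :: zs) 0 none := by
    simp only [distances_to_symbol_alt]
    have hidx := pv_index?_eq target symbols 0
    rw [hzeros] at hidx
    obtain ⟨k, hkk⟩ : ∃ k, PySem.List.index? symbols target = some k := by
      cases h : PySem.List.index? symbols target with
      | none => rw [h] at hidx; simp at hidx
      | some k => exact ⟨k, rfl⟩
    rw [hkk] at hidx
    simp at hidx
    have hfk : (k : Int) = z0 := by omega
    simp only [hkk, hfk]
    rw [pv_fwd_fold]
    simp only [List.nil_append]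
    rw [pv_bwd_fold,
      pv_bwd_spec target (symbols.length : Int) z0 symbols 0 none le_rfl (by simp)
        (fun _ => Or.inl (by rw [hzeros]; rfl)),
      hzeros]
  have hA : distances_to_symbol symbols target
      = ((PySem.List.pyRange 0 z0 1).map (fun pos => z0 - pos) ++ [0])
        ++ pvChunks (symbols.length) zs z0 := by
    simp only [distances_to_symbol]
    rw [pv_zeros_eq, hzeros, pv_getLast?_cons]
    simp only [List.head?_cons, List.tail_cons]
    rw [List.drop_replicate, List.take_append,
      List.take_of_length_le (by simp only [List.length_map, PySem.List.length_pyRange_one]; omega),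
      List.take_replicate]
    have hcount : min ((zs.getLastD z0 + 1).toNat
          - ((PySem.List.pyRange 0 z0 1).map (fun pos => z0 - pos)).length)
          (symbols.length - z0.toNat) = (zs.getLastD z0 - z0).toNat + 1 := by
      simp only [List.length_map, PySem.List.length_pyRange_one]
      omega
    rw [hcount, List.replicate_succ]
    have hshape : ((PySem.List.pyRange 0 z0 1).map (fun pos => z0 - pos)
          ++ (0 :: List.replicate (zs.getLastD z0 - z0).toNat 0))
          ++ (PySem.List.pyRange (zs.getLastD z0 + 1) (symbols.length) 1).map (fun pos => pos - zs.getLastD z0)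
        = ((PySem.List.pyRange 0 z0 1).map (fun pos => z0 - pos) ++ [0])
          ++ List.replicate (zs.getLastD z0 - z0).toNat 0
          ++ (PySem.List.pyRange (zs.getLastD z0 + 1) (symbols.length) 1).map (fun pos => pos - zs.getLastD z0) := by
      simp
    rw [hshape, pv_fill (N := (symbols.length : Int)) zs z0 _ hmem hchain (by
      simp only [List.length_append, List.length_map, PySem.List.length_pyRange_one,
        List.length_cons, List.length_nil]
      omega)]
  rw [hA, hB]
  simp [pvBModel]
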